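-- pv_equiv track=rewrite | github.com/TanzeemAgra/Healthcare | backend/radiology/advanced_rads_calculator.py | _are_similar_values
-- ===== SOURCE A (Python) =====
-- from typing import Dict, List, Optional, Tuple, Any
--
-- def _are_similar_values(val1: Any, val2: Any) -> bool:
--     """Check if two values are semantically similar"""
--     # Simple semantic similarity for demo
--     similar_groups = [
--         ['hyperenhancing', 'increased', 'marked'],
--         ['hypoechoic', 'hypoenhancing', 'decreased'],
--         ['irregular', 'spiculated', 'suspicious'],
--         ['round', 'oval', 'circumscribed'],
--         ['thick', 'thickened', 'increased'],
--         ['present', 'yes', 'positive']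
--     ]
--
--     val1_str = str(val1).lower()
--     val2_str = str(val2).lower()
--
--     for group in similar_groups:
--         if val1_str in group and val2_str in group:
--             return True
--
--     return False
-- ===== SOURCE B (Python) =====
-- def _are_similar_values(val1, val2) -> bool:
--     """Check if two values are semantically similar (inverted-index formulation)."""
--     similar_groups = [
--         ['hyperenhancing', 'increased', 'marked'],
--         ['hypoechoic', 'hypoenhancing', 'decreased'],
--         ['irregular', 'spiculated', 'suspicious'],
--         ['round', 'oval', 'circumscribed'],
--         ['thick', 'thickened', 'increased'],
--         ['present', 'yes', 'positive']
--     ]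
--
--     word_to_groups = {}
--     for i, group in enumerate(similar_groups):
--         for word in group:
--             word_to_groups.setdefault(word, set()).add(i)
--
--     val1_str = str(val1).lower()
--     val2_str = str(val2).lower()
--
--     ids1 = word_to_groups.get(val1_str, set())
--     ids2 = word_to_groups.get(val2_str, set())
--     return bool(ids1 & ids2)
-- ===== Notes on version B (the rewrite author's own statement) =====
-- stated objective: idiomatic
-- what changed: Replaces the per-group scan testing both values against every group by an inverted index built once (word -> set of group ids) with the answer read off as a non-empty intersection of two lookups.
import Mathlib
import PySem

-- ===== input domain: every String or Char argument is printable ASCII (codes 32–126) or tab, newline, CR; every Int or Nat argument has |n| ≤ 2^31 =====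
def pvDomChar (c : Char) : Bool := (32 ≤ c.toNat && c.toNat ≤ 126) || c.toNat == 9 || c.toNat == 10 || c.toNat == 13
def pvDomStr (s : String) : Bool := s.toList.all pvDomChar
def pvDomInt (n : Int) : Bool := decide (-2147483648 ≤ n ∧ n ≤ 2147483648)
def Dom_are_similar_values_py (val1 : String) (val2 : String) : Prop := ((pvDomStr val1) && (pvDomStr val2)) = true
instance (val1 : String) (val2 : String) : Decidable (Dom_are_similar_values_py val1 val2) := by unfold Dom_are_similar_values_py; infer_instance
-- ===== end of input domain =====

-- B replaces A's per-group scan by an inverted index word -> set of group ids, answering with a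
-- set intersection; same results, more idiomatic (no speed claim).

-- ===== PORT A =====
def pvGroups : List (List String) := [
  ["hyperenhancing", "increased", "marked"],
  ["hypoechoic", "hypoenhancing", "decreased"],
  ["irregular", "spiculated", "suspicious"],
  ["round", "oval", "circumscribed"],
  ["thick", "thickened", "increased"],
  ["present", "yes", "positive"]]

-- the 'for group in similar_groups: if … return True' loop with early return
def pvSimLoop (v1 v2 : String) : List (List String) → Bool
  | [] => false
  | g :: rest => if v1 ∈ g ∧ v2 ∈ g then true else pvSimLoop v1 v2 rest

def are_similar_values_py (val1 : String) (val2 : String) : Bool :=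
  let val1_str := PySem.Str.lower val1
  let val2_str := PySem.Str.lower val2
  pvSimLoop val1_str val2_str pvGroups

-- ===== PORT B =====
-- word_to_groups built by the double loop: setdefault(word, set()).add(i)
def pvIndex : PySem.Dict String (PySem.Set Int) :=
  (PySem.List.enumerate pvGroups).foldl
    (fun d p => p.2.foldl (fun d w => d.modify w PySem.Set.empty (fun s => PySem.Set.add s p.1)) d)
    PySem.Dict.empty

def are_similar_values_py_alt (val1 : String) (val2 : String) : Bool :=
  let val1_str := PySem.Str.lower val1
  let val2_str := PySem.Str.lower val2
  let ids1 := pvIndex.getD val1_str PySem.Set.empty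
  let ids2 := pvIndex.getD val2_str PySem.Set.empty
  !(PySem.Set.inter ids1 ids2).isEmpty

-- ===== PRECONDITION & SPEC =====
def Spec_are_similar_values_py (val1 : String) (val2 : String) (out : Bool) : Prop := out = are_similar_values_py_alt val1 val2
instance (val1 : String) (val2 : String) (out : Bool) : Decidable (Spec_are_similar_values_py val1 val2 out) := by unfold Spec_are_similar_values_py; infer_instance

-- ===== CLAIM (what is proved, stated in full; the proofs are below) =====
def Claim_equal_are_similar_values_py : Prop := ∀ (val1 : String) (val2 : String), Dom_are_similar_values_py val1 val2 → Spec_are_similar_values_py val1 val2 (are_similar_values_py val1 val2)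

-- ===== LEMMAS AND PROOFS =====

-- all sixteen word occurrences of the groups (proof helper)
def pvWords : List String := pvGroups.flatten

lemma pv_notword_A (s1 s2 : String) (h : s1 ∉ pvWords) : pvSimLoop s1 s2 pvGroups = false := by
  simp [pvWords, pvGroups] at h
  push_neg at h
  simp [pvSimLoop, pvGroups, h]

lemma pv_notword_A' (s1 s2 : String) (h : s2 ∉ pvWords) : pvSimLoop s1 s2 pvGroups = false := by
  simp [pvWords, pvGroups] at h
  push_neg at h
  simp [pvSimLoop, pvGroups, h]

lemma pv_notword_idx (s : String) (h : s ∉ pvWords) : pvIndex.getD s PySem.Set.empty = [] := by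
  simp [pvWords, pvGroups] at h
  push_neg at h
  have hd : pvIndex = PySem.Dict.mk [("hyperenhancing", [0]), ("increased", [0, 4]),
      ("marked", [0]), ("hypoechoic", [1]), ("hypoenhancing", [1]), ("decreased", [1]),
      ("irregular", [2]), ("spiculated", [2]), ("suspicious", [2]), ("round", [3]),
      ("oval", [3]), ("circumscribed", [3]), ("thick", [4]), ("thickened", [4]),
      ("present", [5]), ("yes", [5]), ("positive", [5])] := by decide
  rw [hd]
  obtain ⟨h1, h2, h3, h4, h5, h6, h7, h8, h9, h10, h11, h12, h13, h14, h15, h16, h17, h18⟩ := h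
  simp only [PySem.Dict.getD_eq_get?_getD, PySem.Dict.get?_mk_cons, beq_iff_eq,
    Ne.symm h1, Ne.symm h2, Ne.symm h3, Ne.symm h4, Ne.symm h5, Ne.symm h6, Ne.symm h7,
    Ne.symm h8, Ne.symm h9, Ne.symm h10, Ne.symm h11, Ne.symm h12, Ne.symm h13,
    Ne.symm h14, Ne.symm h15, Ne.symm h16, Ne.symm h17, Ne.symm h18, if_false]
  rfl

-- core equality on the lowered strings
lemma pv_core (s1 s2 : String) :
    pvSimLoop s1 s2 pvGroups
      = !(PySem.Set.inter (pvIndex.getD s1 PySem.Set.empty) (pvIndex.getD s2 PySem.Set.empty)).isEmpty := by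
  by_cases h1 : s1 ∈ pvWords
  · by_cases h2 : s2 ∈ pvWords
    · fin_cases h1 <;> fin_cases h2 <;> decide
    · rw [pv_notword_A' _ _ h2, pv_notword_idx _ h2]
      simp [PySem.Set.inter]
  · rw [pv_notword_A _ _ h1, pv_notword_idx _ h1]
    simp [PySem.Set.inter]

-- ===== VERDICT (by name: the statement is the Claim_ definition above) =====
theorem are_similar_values_py_spec : Claim_equal_are_similar_values_py := by
  intro val1 val2 _
  unfold Spec_are_similar_values_py are_similar_values_py are_similar_values_py_alt
  exact pv_core _ _
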